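-- pv_equiv track=rewrite | github.com/raihanhd12/telegram-bot-tebak | src/app/services/game/modules/update.py | _reveal_random_char
-- ===== SOURCE A (Python) =====
-- def _reveal_random_char(answer: str, hint_count: int) -> str:
--     """
--     Create a masked answer with some characters revealed.
--
--     Args:
--         answer: The correct answer
--         hint_count: Current hint count
--
--     Returns:
--         String with some characters revealed
--     """
--     chars = list(answer)
--     revealable_indexes = [idx for idx, char in enumerate(chars) if char.isalnum()]
--     if not revealable_indexes:
--         return answer
--
--     revealed_count = min(len(revealable_indexes), max(1, hint_count * 2))
--     revealed_indexes = set(revealable_indexes[:revealed_count])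
--
--     result = []
--     for idx, char in enumerate(chars):
--         if not char.isalnum():
--             result.append(char)
--         elif idx in revealed_indexes:
--             result.append(char.upper())
--         else:
--             result.append("_")
--
--     return "".join(result)
-- ===== SOURCE B (Python) =====
-- def _reveal_random_char(answer: str, hint_count: int) -> str:
--     """Single pass: reveal alphanumerics while a budget lasts, mask the rest."""
--     budget = max(1, hint_count * 2)
--     revealed = 0
--     out = []
--     for char in answer:
--         if not char.isalnum():
--             out.append(char)
--         elif revealed < budget:
--             out.append(char.upper())
--             revealed += 1
--         else:
--             out.append("_")
--     return "".join(out)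
-- ===== Notes on version B (the rewrite author's own statement) =====
-- stated objective: simpler
-- what changed: Replaced A's three passes (index-list comprehension, slice-to-set, masking loop with set membership) by one pass over the characters with an integer budget counter; no index list, no set, and the empty/no-alnum case falls out of the loop.
import Mathlib
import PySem

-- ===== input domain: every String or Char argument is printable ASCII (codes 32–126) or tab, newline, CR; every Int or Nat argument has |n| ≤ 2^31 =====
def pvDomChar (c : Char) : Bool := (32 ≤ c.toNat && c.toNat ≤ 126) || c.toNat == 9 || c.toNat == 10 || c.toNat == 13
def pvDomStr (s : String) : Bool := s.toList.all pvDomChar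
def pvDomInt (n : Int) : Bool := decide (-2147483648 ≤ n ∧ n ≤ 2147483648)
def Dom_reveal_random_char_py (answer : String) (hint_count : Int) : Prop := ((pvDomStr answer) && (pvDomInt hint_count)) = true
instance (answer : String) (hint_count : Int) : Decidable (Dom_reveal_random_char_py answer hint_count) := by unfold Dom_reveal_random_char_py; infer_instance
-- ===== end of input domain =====

-- B replaces A's three passes (index comprehension, slice-to-set, masking loop) by one
-- budget-counting pass over the characters (objective: simpler).

-- ===== PORT A =====
def reveal_random_char_py (answer : String) (hint_count : Int) : String :=
  let chars := answer.toList
  let revealable_indexes :=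
    ((PySem.List.enumerate chars 0).filter (fun p => PySem.Chars.isalnum p.2)).map (fun p => p.1)
  if revealable_indexes = [] then answer
  else
    let revealed_count : Int := min (revealable_indexes.length : Int) (max 1 (hint_count * 2))
    let revealed_indexes : PySem.Set Int :=
      PySem.Set.ofList (PySem.List.slice revealable_indexes none (some revealed_count))
    let result := (PySem.List.enumerate chars 0).map (fun p =>
      if !PySem.Chars.isalnum p.2 then p.2
      else if PySem.Set.contains revealed_indexes p.1 then PySem.Chars.upperChar p.2
      else '_')
    String.ofList result

-- ===== PORT B =====
def revealGo (budget revealed : Int) : List Char → List Char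
  | [] => []
  | c :: cs =>
    if !PySem.Chars.isalnum c then c :: revealGo budget revealed cs
    else if revealed < budget then PySem.Chars.upperChar c :: revealGo budget (revealed + 1) cs
    else '_' :: revealGo budget revealed cs

def reveal_random_char_py_alt (answer : String) (hint_count : Int) : String :=
  String.ofList (revealGo (max 1 (hint_count * 2)) 0 answer.toList)

-- ===== PRECONDITION & SPEC =====
def Spec_reveal_random_char_py (answer : String) (hint_count : Int) (out : String) : Prop := out = reveal_random_char_py_alt answer hint_count
instance (answer : String) (hint_count : Int) (out : String) : Decidable (Spec_reveal_random_char_py answer hint_count out) := by unfold Spec_reveal_random_char_py; infer_instance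

-- ===== CLAIM (what is proved, stated in full; the proofs are below) =====
def Claim_equal_reveal_random_char_py : Prop := ∀ (answer : String) (hint_count : Int), Dom_reveal_random_char_py answer hint_count → Spec_reveal_random_char_py answer hint_count (reveal_random_char_py answer hint_count)

-- ===== LEMMAS AND PROOFS =====

-- count of alphanumeric characters
def cntAl (cs : List Char) : Nat := (cs.filter (fun c => PySem.Chars.isalnum c)).length

-- the alnum index list, as A's comprehension computes it
def ridx (i : Int) : List Char → List Int
  | [] => []
  | c :: cs => if PySem.Chars.isalnum c then i :: ridx (i + 1) cs else ridx (i + 1) cs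

theorem ridx_eq (cs : List Char) : ∀ (i : Int),
    ((PySem.List.enumerate cs i).filter (fun p => PySem.Chars.isalnum p.2)).map (fun p => p.1)
      = ridx i cs := by
  induction cs with
  | nil => intro i; simp [ridx, PySem.List.enumerate_nil]
  | cons c cs ih =>
    intro i
    simp only [PySem.List.enumerate_cons, List.filter_cons, ridx]
    by_cases h : PySem.Chars.isalnum c = true <;> simp [h, ih]

theorem ridx_length (cs : List Char) : ∀ i, (ridx i cs).length = cntAl cs := by
  induction cs with
  | nil => intro i; simp [ridx, cntAl]
  | cons c cs ih =>
    intro i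
    by_cases h : PySem.Chars.isalnum c = true <;> simp [ridx, cntAl, h, ih]

theorem cntAl_lt (cs : List Char) : ∀ (j : Nat) (c : Char), cs[j]? = some c →
    PySem.Chars.isalnum c = true → cntAl (cs.take j) < cntAl cs := by
  induction cs with
  | nil => intro j c h; simp at h
  | cons d cs ih =>
    intro j c hj hc
    cases j with
    | zero =>
      simp at hj; subst hj
      simp [cntAl, List.filter_cons, hc]
    | succ j =>
      simp at hj
      have := ih j c hj hc
      by_cases hd : PySem.Chars.isalnum d = true <;>
        simp [cntAl, List.filter_cons, hd, List.take_succ_cons] at * <;> omega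

theorem mem_take_ridx (cs : List Char) : ∀ (i : Int) (k : Nat) (j : Nat) (c : Char),
    cs[j]? = some c → PySem.Chars.isalnum c = true →
    ((i + (j : Int)) ∈ (ridx i cs).take k ↔ cntAl (cs.take j) < k) := by
  induction cs with
  | nil => intro i k j c h; simp at h
  | cons d cs ih =>
    intro i k j c hj hc
    cases j with
    | zero =>
      simp at hj; subst hj
      cases k with
      | zero => simp [cntAl]
      | succ k =>
        simp [ridx, hc, cntAl]
    | succ j =>
      simp only [List.getElem?_cons_succ] at hj
      by_cases hd : PySem.Chars.isalnum d = true
      · cases k with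
        | zero =>
          simp [ridx, hd, cntAl]
        | succ k =>
          have hrec := ih (i + 1) k j c hj hc
          simp only [ridx, hd, if_pos, List.take_succ_cons, List.mem_cons]
          constructor
          · rintro (h | h)
            · omega
            · have : i + 1 + (j : Int) = i + ((j : Nat) + 1 : Nat) := by push_cast; ring
              rw [this] at hrec
              have := hrec.mp h
              simp [cntAl, List.take_succ_cons, List.filter_cons, hd] at *
              omega
          · intro h
            right
            have : i + 1 + (j : Int) = i + ((j : Nat) + 1 : Nat) := by push_cast; ring
              
            rw [← this] at *
            apply hrec.mpr
            simp [cntAl, List.take_succ_cons, List.filter_cons, hd] at *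
            omega
      · have hrec := ih (i + 1) k j c hj hc
        have hcast : i + 1 + (j : Int) = i + ((j : Nat) + 1 : Nat) := by push_cast; ring
        rw [hcast] at hrec
        simp only [ridx, hd, if_neg, Bool.not_eq_true]
        rw [hrec]
        simp [cntAl, List.take_succ_cons, List.filter_cons, hd]

theorem main_lemma (cs : List Char) : ∀ (i : Int) (S : PySem.Set Int) (b t r : Int),
    ((r < b ↔ t < b) ∧ (r < b → r = t)) →
    (∀ (j : Nat) (c : Char), cs[j]? = some c → PySem.Chars.isalnum c = true →
      (PySem.Set.contains S (i + (j : Int)) = true ↔ t + (cntAl (cs.take j) : Int) < b)) →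
    (PySem.List.enumerate cs i).map (fun p =>
      if !PySem.Chars.isalnum p.2 then p.2
      else if PySem.Set.contains S p.1 then PySem.Chars.upperChar p.2
      else '_') = revealGo b r cs := by
  induction cs with
  | nil => intro i S b t r _ _; simp [revealGo, PySem.List.enumerate_nil]
  | cons c cs ih =>
    intro i S b t r hinv hS
    simp only [PySem.List.enumerate_cons, List.map_cons, revealGo]
    by_cases hc : PySem.Chars.isalnum c = true
    · have h0 := hS 0 c (by simp) hc
      simp only [Nat.cast_zero, add_zero] at h0
      simp only [cntAl, List.take_zero, List.filter_nil, List.length_nil, Nat.cast_zero,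
        add_zero] at h0
      have hshift : ∀ (j : Nat) (d : Char), cs[j]? = some d → PySem.Chars.isalnum d = true →
          (PySem.Set.contains S (i + 1 + (j : Int)) = true ↔ (t + 1) + (cntAl (cs.take j) : Int) < b) := by
        intro j d hj hd
        have := hS (j + 1) d (by simpa using hj) hd
        have hcast : i + ((j : Nat) + 1 : Nat) = i + 1 + (j : Int) := by push_cast; ring
        rw [hcast] at this
        rw [this]
        simp [cntAl, List.take_succ_cons, List.filter_cons, hc]
        omega
      by_cases ht : t < b
      · have hr : r < b := hinv.1.mpr ht
        have hrt : r = t := hinv.2 hr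
        simp only [hc, Bool.not_true, Bool.false_eq_true, if_false, if_neg,
          h0.mpr (by omega), if_pos, hr, if_true]
        rw [List.cons.injEq]
        refine ⟨rfl, ih (i + 1) S b (t + 1) (r + 1) ⟨by omega, by omega⟩ hshift⟩
      · have hr : ¬ r < b := fun h => ht (hinv.1.mp h)
        have hnm : PySem.Set.contains S i ≠ true := by
          intro h; exact ht (by have := h0.mp h; omega)
        simp only [hc, Bool.not_true, Bool.false_eq_true, if_false, if_neg hnm, if_neg hr]
        rw [List.cons.injEq]
        refine ⟨rfl, ih (i + 1) S b (t + 1) r ⟨by omega, by omega⟩ hshift⟩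
    · simp only [Bool.not_eq_true] at hc
      have hshift : ∀ (j : Nat) (d : Char), cs[j]? = some d → PySem.Chars.isalnum d = true →
          (PySem.Set.contains S (i + 1 + (j : Int)) = true ↔ t + (cntAl (cs.take j) : Int) < b) := by
        intro j d hj hd
        have := hS (j + 1) d (by simpa using hj) hd
        have hcast : i + ((j : Nat) + 1 : Nat) = i + 1 + (j : Int) := by push_cast; ring
        rw [hcast] at this
        rw [this]
        simp [cntAl, List.take_succ_cons, List.filter_cons, hc]
      rw [if_pos (by simp [hc]), if_pos (by simp [hc]), List.cons.injEq]
      exact ⟨rfl, ih (i + 1) S b t r hinv hshift⟩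

theorem ridx_nil_all (cs : List Char) : ∀ i, ridx i cs = [] → ∀ c ∈ cs, PySem.Chars.isalnum c = false := by
  induction cs with
  | nil => simp
  | cons d cs ih =>
    intro i h c hmem
    by_cases hd : PySem.Chars.isalnum d = true
    · simp [ridx, hd] at h
    · simp only [ridx, hd, if_neg, Bool.not_eq_true] at h
      rcases List.mem_cons.mp hmem with rfl | hm
      · simpa using hd
      · exact ih (i + 1) h c hm

theorem revealGo_id (cs : List Char) (b r : Int) (h : ∀ c ∈ cs, PySem.Chars.isalnum c = false) :
    revealGo b r cs = cs := by
  induction cs with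
  | nil => simp [revealGo]
  | cons c cs ih =>
    have hc := h c (by simp)
    simp only [revealGo, hc, Bool.not_false, if_pos]
    exact congrArg (c :: ·) (ih (fun d hd => h d (by simp [hd])))

-- ===== VERDICT (by name: the statement is the Claim_ definition above) =====
theorem reveal_random_char_py_spec : Claim_equal_reveal_random_char_py := by
  unfold Claim_equal_reveal_random_char_py Spec_reveal_random_char_py
  intro answer hc _
  unfold reveal_random_char_py reveal_random_char_py_alt
  simp only [ridx_eq]
  set chars := answer.toList with hchars
  by_cases hnil : ridx 0 chars = []
  · rw [if_pos hnil, revealGo_id chars _ _ (ridx_nil_all chars 0 hnil)]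
    exact String.ofList_toList.symm
  · rw [if_neg hnil]
    set b : Int := max 1 (hc * 2) with hb
    have hb1 : 1 ≤ b := le_max_left _ _
    set total : Int := ((ridx 0 chars).length : Int) with htot
    have htotal : (ridx 0 chars).length = cntAl chars := ridx_length chars 0
    set rc : Int := min total b with hrc
    have hrc0 : 0 ≤ rc := by
      have : 1 ≤ total := by
        have : 0 < (ridx 0 chars).length := List.length_pos_of_ne_nil hnil
        omega
      omega
    rw [PySem.List.slice_to _ hrc0]
    apply congrArg String.ofList
    apply main_lemma chars 0 _ b 0 0 ⟨Iff.rfl, fun _ => rfl⟩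
    intro j c hj hcal
    have hmem := mem_take_ridx chars 0 rc.toNat j c hj hcal
    have hcnt := cntAl_lt chars j c hj hcal
    constructor
    · intro h
      rw [PySem.Set.contains_iff, PySem.Set.mem_ofList] at h
      have := hmem.mp h
      omega
    · intro h
      rw [PySem.Set.contains_iff, PySem.Set.mem_ofList]
      apply hmem.mpr
      omega
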